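-- pv_equiv track=rewrite | github.com/mafflerbach/neural-orchestrator | coordinator_agent/utils.py | resolve_with_sources
-- ===== SOURCE A (Python) =====
-- from typing import List, Dict, Any
-- from typing import Tuple
--
-- def resolve_with_sources(
--     props: Dict[str, Any],
--     context: Dict[str, Any],
--     extracted: Dict[str, Any],
--     prior_responses: Dict[str, Any],
-- ) -> Tuple[Dict[str, Any], Dict[str, str]]:
--     resolved = {}
--     sources = {}
--
--     for key in props:
--         if key in context:
--             resolved[key] = context[key]
--             sources[key] = "context"
--         elif key in extracted:
--             resolved[key] = extracted[key]
--             sources[key] = "llm"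
--         else:
--             for resp in prior_responses.values():
--                 if isinstance(resp, dict) and key in resp:
--                     resolved[key] = resp[key]
--                     sources[key] = "previous"
--                     break
--
--     return resolved, sources
-- ===== SOURCE B (Python) =====
-- def resolve_with_sources(props, context, extracted, prior_responses):
--     # Build one overlay index (lowest priority first), then read it back in props order.
--     best = {}
--     for resp in prior_responses.values():
--         if isinstance(resp, dict):
--             for k, v in resp.items():
--                 if k not in best:
--                     best[k] = (v, "previous")
--     for k, v in extracted.items():
--         best[k] = (v, "llm")
--     for k, v in context.items():
--         best[k] = (v, "context")
--
--     resolved = {}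
--     sources = {}
--     for key in props:
--         hit = best.get(key)
--         if hit is not None:
--             resolved[key] = hit[0]
--             sources[key] = hit[1]
--     return resolved, sources
-- ===== Notes on version B (the rewrite author's own statement) =====
-- stated objective: faster
-- what changed: B builds one overlay index (prior responses first-occurrence, then extracted, then context) and reads it back in a single pass over props, instead of testing the three sources per props key with an inner scan over all prior responses.
import Mathlib
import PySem

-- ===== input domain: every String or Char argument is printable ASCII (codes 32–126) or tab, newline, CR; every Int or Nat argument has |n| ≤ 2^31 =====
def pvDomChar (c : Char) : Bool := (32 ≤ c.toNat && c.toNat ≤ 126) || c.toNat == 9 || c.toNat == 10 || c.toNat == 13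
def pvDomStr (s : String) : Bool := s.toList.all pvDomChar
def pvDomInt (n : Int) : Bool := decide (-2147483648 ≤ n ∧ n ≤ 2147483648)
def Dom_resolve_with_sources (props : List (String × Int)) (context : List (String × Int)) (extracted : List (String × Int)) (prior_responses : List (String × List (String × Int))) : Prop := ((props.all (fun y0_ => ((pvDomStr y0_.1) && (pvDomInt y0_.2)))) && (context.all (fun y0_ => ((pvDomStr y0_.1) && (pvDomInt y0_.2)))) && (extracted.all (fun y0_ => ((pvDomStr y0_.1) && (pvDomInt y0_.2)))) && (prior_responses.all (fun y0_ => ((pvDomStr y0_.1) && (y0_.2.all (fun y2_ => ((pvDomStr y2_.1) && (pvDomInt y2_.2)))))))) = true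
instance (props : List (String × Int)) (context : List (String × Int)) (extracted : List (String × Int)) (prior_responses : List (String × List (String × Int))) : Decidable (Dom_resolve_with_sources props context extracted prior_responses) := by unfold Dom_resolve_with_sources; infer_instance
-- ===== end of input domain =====

-- B replaces the per-key three-source test (with an inner scan over prior_responses) by one
-- overlay index built once and read back in props order; equal output proved on dict-shaped inputs.

-- ===== PORT A =====
-- first-match lookup in a dict given as its items list ('key in d' then 'd[key]')
def pvLookupA (d : List (String × Int)) (key : String) : Option Int :=
  match d with
  | [] => none
  | p :: rest => if p.1 == key then some p.2 else pvLookupA rest key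

-- the inner 'for resp in prior_responses.values(): if isinstance(resp, dict) and key in resp: …; break'
-- (under the type convention every prior response value is a dict, so the isinstance test is always true)
def pvFirstPrior (prs : List (String × List (String × Int))) (key : String) : Option Int :=
  match prs with
  | [] => none
  | pr :: rest =>
    match pvLookupA pr.2 key with
    | some v => some v
    | none => pvFirstPrior rest key

def resolve_with_sources (props : List (String × Int)) (context : List (String × Int)) (extracted : List (String × Int)) (prior_responses : List (String × List (String × Int))) : (List (String × Int)) × (List (String × String)) :=
  let st := props.foldl
    (fun (st : PySem.Dict String Int × PySem.Dict String String) kv =>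
      match pvLookupA context kv.1 with
      | some v => (st.1.insert kv.1 v, st.2.insert kv.1 "context")
      | none =>
        match pvLookupA extracted kv.1 with
        | some v => (st.1.insert kv.1 v, st.2.insert kv.1 "llm")
        | none =>
          match pvFirstPrior prior_responses kv.1 with
          | some v => (st.1.insert kv.1 v, st.2.insert kv.1 "previous")
          | none => st)
    (PySem.Dict.empty, PySem.Dict.empty)
  (st.1.items, st.2.items)

-- ===== PORT B =====
-- the overlay index 'best': prior responses (first occurrence kept), then extracted, then context
def pvBest (context : List (String × Int)) (extracted : List (String × Int)) (prior_responses : List (String × List (String × Int))) : PySem.Dict String (Int × String) :=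
  let b0 := prior_responses.foldl
    (fun b pr => pr.2.foldl
      (fun (b : PySem.Dict String (Int × String)) kv =>
        if b.contains kv.1 then b else b.insert kv.1 (kv.2, "previous")) b)
    PySem.Dict.empty
  let b1 := extracted.foldl (fun b kv => b.insert kv.1 (kv.2, "llm")) b0
  context.foldl (fun b kv => b.insert kv.1 (kv.2, "context")) b1

def resolve_with_sources_alt (props : List (String × Int)) (context : List (String × Int)) (extracted : List (String × Int)) (prior_responses : List (String × List (String × Int))) : (List (String × Int)) × (List (String × String)) :=
  let best := pvBest context extracted prior_responses
  let st := props.foldl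
    (fun (st : PySem.Dict String Int × PySem.Dict String String) kv =>
      match best.get? kv.1 with
      | some hit => (st.1.insert kv.1 hit.1, st.2.insert kv.1 hit.2)
      | none => st)
    (PySem.Dict.empty, PySem.Dict.empty)
  (st.1.items, st.2.items)

-- ===== PRECONDITION & SPEC =====
-- Python dicts cannot carry duplicate keys, so this excludes no input the Python A runs on: it only
-- rules out assoc-list encodings of 'context'/'extracted' with a repeated key, where A's first-match
-- lookup and B's overwrite-overlay would disagree.
def Pre_resolve_with_sources (props : List (String × Int)) (context : List (String × Int)) (extracted : List (String × Int)) (prior_responses : List (String × List (String × Int))) : Prop :=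
  (context.map Prod.fst).Nodup ∧ (extracted.map Prod.fst).Nodup
instance (props : List (String × Int)) (context : List (String × Int)) (extracted : List (String × Int)) (prior_responses : List (String × List (String × Int))) : Decidable (Pre_resolve_with_sources props context extracted prior_responses) := by unfold Pre_resolve_with_sources; infer_instance

def pvWitness_resolve_with_sources : (List (String × Int)) × (List (String × Int)) × (List (String × Int)) × (List (String × List (String × Int))) :=
  ([("a", 1), ("b", 2), ("c", 3)], [("a", 5)], [("b", 7)], [("r1", [("c", 9)])])

def Spec_resolve_with_sources (props : List (String × Int)) (context : List (String × Int)) (extracted : List (String × Int)) (prior_responses : List (String × List (String × Int))) (out : (List (String × Int)) × (List (String × String))) : Prop := out = resolve_with_sources_alt props context extracted prior_responses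
instance (props : List (String × Int)) (context : List (String × Int)) (extracted : List (String × Int)) (prior_responses : List (String × List (String × Int))) (out : (List (String × Int)) × (List (String × String))) : Decidable (Spec_resolve_with_sources props context extracted prior_responses out) := by unfold Spec_resolve_with_sources; infer_instance

-- ===== CLAIM (what is proved, stated in full; the proofs are below) =====
def Claim_equal_resolve_with_sources : Prop := ∀ (props : List (String × Int)) (context : List (String × Int)) (extracted : List (String × Int)) (prior_responses : List (String × List (String × Int))), Dom_resolve_with_sources props context extracted prior_responses → Pre_resolve_with_sources props context extracted prior_responses → Spec_resolve_with_sources props context extracted prior_responses (resolve_with_sources props context extracted prior_responses)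

-- ===== LEMMAS AND PROOFS =====

lemma pvLookupA_eq_none_of_not_mem (l : List (String × Int)) (k : String)
    (h : k ∉ l.map Prod.fst) : pvLookupA l k = none := by
  induction l with
  | nil => rfl
  | cons a l ih =>
    simp only [List.map_cons, List.mem_cons, not_or] at h
    simp only [pvLookupA]
    rw [if_neg (by simp only [beq_iff_eq]; exact fun e => h.1 e.symm), ih h.2]

lemma get?_foldl_tagged (l : List (String × Int)) (tag : String)
    (h : (l.map Prod.fst).Nodup) :
    ∀ (b : PySem.Dict String (Int × String)) (k : String),
      (l.foldl (fun b kv => b.insert kv.1 (kv.2, tag)) b).get? k =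
        match pvLookupA l k with
        | some v => some (v, tag)
        | none => b.get? k := by
  induction l with
  | nil => intro b k; rfl
  | cons a l ih =>
    intro b k
    simp only [List.map_cons, List.nodup_cons] at h
    simp only [List.foldl_cons]
    rw [ih h.2]
    by_cases hk : k = a.1
    · subst hk
      rw [pvLookupA_eq_none_of_not_mem l a.1 h.1]
      simp only [pvLookupA, beq_self_eq_true, if_true, PySem.Dict.get?_insert_self]
    · have : pvLookupA (a :: l) k = pvLookupA l k := by
        simp only [pvLookupA]
        rw [if_neg (by simp only [beq_iff_eq]; exact fun e => hk e.symm)]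
      rw [this]
      cases hl : pvLookupA l k with
      | some v => rfl
      | none =>
        exact PySem.Dict.get?_insert_of_ne b (a.2, tag) hk

lemma get?_foldl_guard (l : List (String × Int)) :
    ∀ (b : PySem.Dict String (Int × String)) (k : String),
      (l.foldl (fun b kv => if b.contains kv.1 then b else b.insert kv.1 (kv.2, "previous")) b).get? k =
        match b.get? k with
        | some w => some w
        | none => (pvLookupA l k).map (fun v => (v, "previous")) := by
  induction l with
  | nil =>
    intro b k
    rw [List.foldl_nil]
    cases h : b.get? k <;> rfl
  | cons a l ih =>
    intro b k
    simp only [List.foldl_cons]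
    by_cases hc : b.contains a.1 = true
    · rw [if_pos hc, ih]
      cases hbk : b.get? k with
      | some w => rfl
      | none =>
        have hk : k ≠ a.1 := by
          intro hk; subst hk
          rw [PySem.Dict.contains_eq_isSome_get?, hbk] at hc; simp at hc
        simp only [pvLookupA]
        rw [if_neg (by simp only [beq_iff_eq]; exact fun e => hk e.symm)]
    · rw [if_neg hc, ih]
      by_cases hk : k = a.1
      · subst hk
        have hbk : b.get? a.1 = none := by
          rw [PySem.Dict.contains_eq_isSome_get?] at hc
          cases h : b.get? a.1 with
          | none => rfl
          | some w => rw [h] at hc; simp at hc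
        rw [PySem.Dict.get?_insert_self, hbk]
        simp only [pvLookupA, beq_self_eq_true, if_true, Option.map_some]
      · rw [PySem.Dict.get?_insert_of_ne b (a.2, "previous") hk]
        cases hbk : b.get? k with
        | some w => rfl
        | none =>
          simp only [pvLookupA]
          rw [if_neg (by simp only [beq_iff_eq]; exact fun e => hk e.symm)]

lemma get?_foldl_priors (prs : List (String × List (String × Int))) :
    ∀ (b : PySem.Dict String (Int × String)) (k : String),
      (prs.foldl (fun b pr => pr.2.foldl
          (fun (b : PySem.Dict String (Int × String)) kv =>
            if b.contains kv.1 then b else b.insert kv.1 (kv.2, "previous")) b) b).get? k =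
        match b.get? k with
        | some w => some w
        | none => (pvFirstPrior prs k).map (fun v => (v, "previous")) := by
  induction prs with
  | nil =>
    intro b k
    rw [List.foldl_nil]
    cases h : b.get? k <;> rfl
  | cons pr rest ih =>
    intro b k
    simp only [List.foldl_cons]
    rw [ih, get?_foldl_guard]
    simp only [pvFirstPrior]
    cases b.get? k with
    | some w => rfl
    | none =>
      cases pvLookupA pr.2 k with
      | some v => rfl
      | none => rfl

lemma get?_pvBest (context extracted : List (String × Int)) (prs : List (String × List (String × Int)))
    (hc : (context.map Prod.fst).Nodup) (he : (extracted.map Prod.fst).Nodup) (k : String) :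
    (pvBest context extracted prs).get? k =
      match pvLookupA context k with
      | some v => some (v, "context")
      | none =>
        match pvLookupA extracted k with
        | some v => some (v, "llm")
        | none => (pvFirstPrior prs k).map (fun v => (v, "previous")) := by
  unfold pvBest
  rw [get?_foldl_tagged context "context" hc, get?_foldl_tagged extracted "llm" he,
      get?_foldl_priors]
  cases pvLookupA context k with
  | some v => rfl
  | none =>
    cases pvLookupA extracted k with
    | some v => rfl
    | none => rw [PySem.Dict.get?_empty]

-- ===== VERDICT (by name: the statement is the Claim_ definition above) =====
theorem resolve_with_sources_spec : Claim_equal_resolve_with_sources := by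
  intro props context extracted prior_responses _hdom hpre
  obtain ⟨hc, he⟩ := hpre
  unfold Spec_resolve_with_sources resolve_with_sources resolve_with_sources_alt
  have hstep :
      (fun (st : PySem.Dict String Int × PySem.Dict String String) (kv : String × Int) =>
        match pvLookupA context kv.1 with
        | some v => (st.1.insert kv.1 v, st.2.insert kv.1 "context")
        | none =>
          match pvLookupA extracted kv.1 with
          | some v => (st.1.insert kv.1 v, st.2.insert kv.1 "llm")
          | none =>
            match pvFirstPrior prior_responses kv.1 with
            | some v => (st.1.insert kv.1 v, st.2.insert kv.1 "previous")
            | none => st)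
      = (fun (st : PySem.Dict String Int × PySem.Dict String String) (kv : String × Int) =>
        match (pvBest context extracted prior_responses).get? kv.1 with
        | some hit => (st.1.insert kv.1 hit.1, st.2.insert kv.1 hit.2)
        | none => st) := by
    funext st kv
    rw [get?_pvBest context extracted prior_responses hc he kv.1]
    cases pvLookupA context kv.1 with
    | some v => rfl
    | none =>
      cases pvLookupA extracted kv.1 with
      | some v => rfl
      | none =>
        cases pvFirstPrior prior_responses kv.1 with
        | some v => rfl
        | none => rfl
  simp only [hstep]
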